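-- pv_equiv track=rewrite | github.com/namnt99bioinfo/rosalind_biotech | code/RnaSplicing.py | slicingRna
-- ===== SOURCE A (Python) =====
-- DNA_CODON_DICT = {
--     'TTT': 'F', 'CTT': 'L', 'ATT': 'I', 'GTT': 'V',
--     'TTC': 'F', 'CTC': 'L', 'ATC': 'I', 'GTC': 'V',
--     'TTA': 'L', 'CTA': 'L', 'ATA': 'I', 'GTA': 'V',
--     'TTG': 'L', 'CTG': 'L', 'ATG': 'M', 'GTG': 'V',
--     'TCT': 'S', 'CCT': 'P', 'ACT': 'T', 'GCT': 'A',
--     'TCC': 'S', 'CCC': 'P', 'ACC': 'T', 'GCC': 'A',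
--     'TCA': 'S', 'CCA': 'P', 'ACA': 'T', 'GCA': 'A',
--     'TCG': 'S', 'CCG': 'P', 'ACG': 'T', 'GCG': 'A',
--     'TAT': 'Y', 'CAT': 'H', 'AAT': 'N', 'GAT': 'D',
--     'TAC': 'Y', 'CAC': 'H', 'AAC': 'N', 'GAC': 'D',
--     'TAA': '-', 'CAA': 'Q', 'AAA': 'K', 'GAA': 'E',
--     'TAG': '-', 'CAG': 'Q', 'AAG': 'K', 'GAG': 'E',
--     'TGT': 'C', 'CGT': 'R', 'AGT': 'S', 'GGT': 'G',
--     'TGC': 'C', 'CGC': 'R', 'AGC': 'S', 'GGC': 'G',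
--     'TGA': '-', 'CGA': 'R', 'AGA': 'R', 'GGA': 'G',
--     'TGG': 'W', 'CGG': 'R', 'AGG': 'R', 'GGG': 'G'
-- }
--
-- def slicingRna(orgDna, introns):
--     protein = ''
--     for intron in introns:
--         orgDna = orgDna.replace(intron, '')
--     for index in range(0, len(orgDna) - 2, 3):
--         if DNA_CODON_DICT[orgDna[index:index + 3]] == '-':
--             break
--         protein += DNA_CODON_DICT[orgDna[index:index + 3]]
--     return protein
-- ===== SOURCE B (Python) =====
-- BASES = 'TCAG'
-- AA_TABLE = 'FFLLSSSSYY--CC-WLLLLPPPPHHQQRRRRIIIMTTTTNNKKSSRRVVVVAAAADDEEGGGG'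
--
--
-- def slicingRna(orgDna, introns):
--     for intron in introns:
--         orgDna = orgDna.replace(intron, '')
--     protein = []
--     rest = orgDna
--     while len(rest) >= 3:
--         aa = AA_TABLE[16 * BASES.index(rest[0])
--                       + 4 * BASES.index(rest[1])
--                       + BASES.index(rest[2])]
--         if aa == '-':
--             break
--         protein.append(aa)
--         rest = rest[3:]
--     return ''.join(protein)
-- ===== Notes on version B (the rewrite author's own statement) =====
-- stated objective: alternative
-- what changed: A's codon dictionary and index-range loop with a break flag are replaced by arithmetic codon decoding (16*i0+4*i1+i2 from base positions in 'TCAG') into a flat 64-character amino-acid table, driven by a while loop that consumes the string three bases at a time and joins a list accumulator; Pre_ excludes the inputs where A raises KeyError (a codon off the table before the first stop), where B raises ValueError.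
import Mathlib
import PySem

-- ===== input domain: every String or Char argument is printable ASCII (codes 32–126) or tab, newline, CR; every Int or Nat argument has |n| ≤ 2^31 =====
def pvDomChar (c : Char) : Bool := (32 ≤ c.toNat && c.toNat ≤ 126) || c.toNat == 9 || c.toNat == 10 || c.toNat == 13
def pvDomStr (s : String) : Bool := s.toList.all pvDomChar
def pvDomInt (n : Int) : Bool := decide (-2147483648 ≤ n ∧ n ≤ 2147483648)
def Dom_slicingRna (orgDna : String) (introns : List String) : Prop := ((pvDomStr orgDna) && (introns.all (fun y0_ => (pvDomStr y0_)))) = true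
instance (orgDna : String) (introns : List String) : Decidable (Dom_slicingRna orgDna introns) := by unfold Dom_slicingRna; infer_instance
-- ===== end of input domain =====

-- B replaces A's codon dictionary and index-range loop (with a break flag) by arithmetic
-- codon decoding into a flat 64-character amino-acid table, consuming the string three
-- bases at a time into a joined list accumulator (objective: alternative).

-- ===== PORT A =====
def DNA_CODON_DICT : PySem.Dict String String := PySem.Dict.mk [
  ("TTT", "F"), ("CTT", "L"), ("ATT", "I"), ("GTT", "V"),
  ("TTC", "F"), ("CTC", "L"), ("ATC", "I"), ("GTC", "V"),
  ("TTA", "L"), ("CTA", "L"), ("ATA", "I"), ("GTA", "V"),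
  ("TTG", "L"), ("CTG", "L"), ("ATG", "M"), ("GTG", "V"),
  ("TCT", "S"), ("CCT", "P"), ("ACT", "T"), ("GCT", "A"),
  ("TCC", "S"), ("CCC", "P"), ("ACC", "T"), ("GCC", "A"),
  ("TCA", "S"), ("CCA", "P"), ("ACA", "T"), ("GCA", "A"),
  ("TCG", "S"), ("CCG", "P"), ("ACG", "T"), ("GCG", "A"),
  ("TAT", "Y"), ("CAT", "H"), ("AAT", "N"), ("GAT", "D"),
  ("TAC", "Y"), ("CAC", "H"), ("AAC", "N"), ("GAC", "D"),
  ("TAA", "-"), ("CAA", "Q"), ("AAA", "K"), ("GAA", "E"),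
  ("TAG", "-"), ("CAG", "Q"), ("AAG", "K"), ("GAG", "E"),
  ("TGT", "C"), ("CGT", "R"), ("AGT", "S"), ("GGT", "G"),
  ("TGC", "C"), ("CGC", "R"), ("AGC", "S"), ("GGC", "G"),
  ("TGA", "-"), ("CGA", "R"), ("AGA", "R"), ("GGA", "G"),
  ("TGG", "W"), ("CGG", "R"), ("AGG", "R"), ("GGG", "G")]

-- Python A's DNA_CODON_DICT[codon] raises KeyError on a missing key; under Pre_ every
-- codon looked up before the break is a key, so the `getD … ""` default is never consulted.
def slicingRna (orgDna : String) (introns : List String) : String :=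
  let dna := introns.foldl (fun s intron => PySem.Str.replace s intron "") orgDna
  (((PySem.List.pyRange 0 (PySem.Str.len dna - 2) 3).foldl
      (fun (st : String × Bool) index =>
        if st.2 then st
        else if DNA_CODON_DICT.getD (PySem.Str.slice dna (some index) (some (index + 3))) "" = "-" then
          (st.1, true)  -- break
        else
          (st.1 ++ DNA_CODON_DICT.getD (PySem.Str.slice dna (some index) (some (index + 3))) "", st.2))
      ("", false))).1

-- ===== PORT B =====
def AA_TABLE : List Char := "FFLLSSSSYY--CC-WLLLLPPPPHHQQRRRRIIIMTTTTNNKKSSRRVVVVAAAADDEEGGGG".toList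

-- BASES.index(c) raises ValueError when c is not a base; under Pre_ every base looked up
-- before the break is in 'TCAG', so the `.getD 0` default is never consulted.
def pvBaseIdx (c : Char) : Nat := (PySem.List.index? ['T', 'C', 'A', 'G'] c).getD 0

-- AA_TABLE[16*i0+4*i1+i2]: in range whenever the three .index calls succeed (one char → 1-char string)
def pvAa (c0 c1 c2 : Char) : String :=
  String.ofList [AA_TABLE.getD (16 * pvBaseIdx c0 + 4 * pvBaseIdx c1 + pvBaseIdx c2) ' ']

-- the while loop: state (protein, rest); rest[0],rest[1],rest[2] exist iff len(rest) >= 3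
def pvTranslate : List Char → List String → List String
  | c0 :: c1 :: c2 :: rest, protein =>
      let aa := pvAa c0 c1 c2
      if aa = "-" then protein else pvTranslate rest (protein ++ [aa])
  | _, protein => protein

def slicingRna_alt (orgDna : String) (introns : List String) : String :=
  let dna := introns.foldl (fun s intron => PySem.Str.replace s intron "") orgDna
  PySem.Str.join "" (pvTranslate dna.toList [])

-- ===== PRECONDITION & SPEC =====
-- Pre_ excludes exactly the inputs on which A raises KeyError: those whose intron-stripped
-- DNA has a codon that is not in the table occurring before the first stop codon (B raises
-- ValueError on the same inputs).
def Pre_slicingRna (orgDna : String) (introns : List String) : Prop :=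
  let dna := introns.foldl (fun s intron => PySem.Str.replace s intron "") orgDna
  let cods := (PySem.List.pyRange 0 (PySem.Str.len dna - 2) 3).map
      (fun i => PySem.Str.slice dna (some i) (some (i + 3)))
  ((cods.dropWhile (fun c => DNA_CODON_DICT.contains c
      && !(DNA_CODON_DICT.getD c "" == "-"))).head?.all
    (fun c => DNA_CODON_DICT.contains c)) = true
instance (orgDna : String) (introns : List String) : Decidable (Pre_slicingRna orgDna introns) := by unfold Pre_slicingRna; infer_instance

def pvWitness_slicingRna : String × List String := ("ATGGTCAAATAGCCC", ["CCC"])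

def Spec_slicingRna (orgDna : String) (introns : List String) (out : String) : Prop := out = slicingRna_alt orgDna introns
instance (orgDna : String) (introns : List String) (out : String) : Decidable (Spec_slicingRna orgDna introns out) := by unfold Spec_slicingRna; infer_instance

-- ===== CLAIM (what is proved, stated in full; the proofs are below) =====
def Claim_equal_slicingRna : Prop := ∀ (orgDna : String) (introns : List String), Dom_slicingRna orgDna introns → Pre_slicingRna orgDna introns → Spec_slicingRna orgDna introns (slicingRna orgDna introns)

-- ===== LEMMAS AND PROOFS =====

-- strings are equal when their character lists are
theorem pv_str_ext {a b : String} (h : a.toList = b.toList) : a = b := by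
  have h2 := congrArg String.ofList h
  simpa using h2

theorem pv_flatten_intersperse_nil (ls : List (List Char)) :
    (List.intersperse ([] : List Char) ls).flatten = ls.flatten := by
  induction ls with
  | nil => rfl
  | cons a l ih => cases l with
    | nil => rfl
    | cons b m => simp only [List.intersperse, List.flatten_cons] at *; simp [ih]

theorem pv_join_empty_toList (vs : List String) :
    (PySem.Str.join "" vs).toList = (vs.map String.toList).flatten := by
  simp [PySem.Str.toList_join, PySem.Chars.join, List.intercalate,
        pv_flatten_intersperse_nil]

theorem pv_join_snoc (acc : List String) (v : String) :
    PySem.Str.join "" (acc ++ [v]) = PySem.Str.join "" acc ++ v := by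
  apply pv_str_ext
  simp only [String.toList_append, pv_join_empty_toList, List.map_append, List.map_cons,
    List.map_nil, List.flatten_append, List.flatten_cons, List.flatten_nil, List.append_nil]

-- chunking into complete codons
def pvChunk3 : List Char → List (List Char)
  | c0 :: c1 :: c2 :: rest => [c0, c1, c2] :: pvChunk3 rest
  | _ => []

-- step-3 index range peels off its head
theorem pv_pyRange3_cons (b : Int) (hb : 0 < b) :
    PySem.List.pyRange 0 b 3 = 0 :: (PySem.List.pyRange 0 (b - 3) 3).map (· + 3) := by
  rw [PySem.List.pyRange_of_pos 0 b (by norm_num),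
      PySem.List.pyRange_of_pos 0 (b - 3) (by norm_num)]
  by_cases h3 : 3 < b
  · rw [if_pos hb, if_pos (by omega)]
    have hc : ((b - 0 + 3 - 1) / 3).toNat = ((b - 3 - 0 + 3 - 1) / 3).toNat + 1 := by omega
    rw [hc, List.range_succ_eq_map]
    simp only [List.map_cons, List.map_map]
    refine List.cons_eq_cons.mpr ⟨by norm_num, ?_⟩
    apply List.map_congr_left
    intro k _
    simp only [Function.comp_apply]
    push_cast
    ring
  · rw [if_pos hb, if_neg (by omega)]
    have h1 : ((b - 0 + 3 - 1) / 3).toNat = 1 := by omega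
    rw [h1]
    simp [List.range_one]

-- the codons A slices out are exactly the complete 3-chunks
theorem pv_slices_eq_chunks (cs : List Char) :
    (PySem.List.pyRange 0 ((cs.length : Int) - 2) 3).map
        (fun i => PySem.Chars.slice cs (some i) (some (i + 3))) = pvChunk3 cs := by
  induction cs using pvChunk3.induct with
  | case1 c0 c1 c2 rest ih =>
    have hb : (0 : Int) < (((c0 :: c1 :: c2 :: rest).length : Int) - 2) := by
      simp only [List.length_cons]
      push_cast
      omega
    rw [pv_pyRange3_cons _ hb]
    simp only [List.map_cons, List.map_map, pvChunk3]
    refine List.cons_eq_cons.mpr ⟨?_, ?_⟩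
    · show PySem.Chars.slice (c0 :: c1 :: c2 :: rest) (some 0) (some (0 + 3)) = [c0, c1, c2]
      rw [show PySem.Chars.slice (c0 :: c1 :: c2 :: rest) (some 0) (some (0 + 3))
            = PySem.List.slice (c0 :: c1 :: c2 :: rest) (some 0) (some (0 + 3)) from rfl,
          PySem.List.slice_toNat _ le_rfl (by norm_num)]
      rfl
    · have hlen : (((c0 :: c1 :: c2 :: rest).length : Int) - 2) - 3
          = ((rest.length : Int) - 2) := by
        simp only [List.length_cons]
        push_cast
        ring
      rw [hlen, ← ih]
      apply List.map_congr_left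
      intro i hi
      have hi0 : 0 ≤ i := ((PySem.List.mem_pyRange_iff_of_pos (by norm_num) i).mp hi).1
      simp only [Function.comp_apply]
      show PySem.Chars.slice (c0 :: c1 :: c2 :: rest) (some (i + 3)) (some (i + 3 + 3))
            = PySem.Chars.slice rest (some i) (some (i + 3))
      rw [show ∀ xs a? b?, PySem.Chars.slice xs a? b? = PySem.List.slice xs a? b? from fun _ _ _ => rfl,
          show ∀ xs a? b?, PySem.Chars.slice xs a? b? = PySem.List.slice xs a? b? from fun _ _ _ => rfl,
          PySem.List.slice_toNat _ (by omega) (by omega),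
          PySem.List.slice_toNat _ hi0 (by omega)]
      have h3 : (i + 3).toNat = i.toNat + 3 := by omega
      have h6 : (i + 3 + 3).toNat = (i + 3).toNat + 3 := by omega
      rw [h6, h3]
      simp only [List.drop_succ_cons]
      congr 1
      omega
  | case2 t ht =>
    have hb : ((t.length : Int) - 2) ≤ 0 := by
      match t, ht with
      | [], _ => simp
      | [c], _ => simp
      | [c, c'], _ => simp
      | c0 :: c1 :: c2 :: rest, ht => exact absurd (ht c0 c1 c2 rest rfl) not_false
    have hch : pvChunk3 t = [] := by
      match t, ht with
      | [], _ => rfl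
      | [c], _ => rfl
      | [c, c'], _ => rfl
      | c0 :: c1 :: c2 :: rest, ht => exact absurd (ht c0 c1 c2 rest rfl) not_false
    rw [hch, PySem.List.pyRange_of_pos 0 _ (by norm_num), if_neg (by omega)]
    rfl

set_option maxHeartbeats 3200000 in
-- arithmetic decoding agrees with the dictionary on every codon the dictionary contains
theorem pv_aa_eq (c0 c1 c2 : Char)
    (h : DNA_CODON_DICT.contains (String.ofList [c0, c1, c2]) = true) :
    pvAa c0 c1 c2 = DNA_CODON_DICT.getD (String.ofList [c0, c1, c2]) "" := by
  have hm : String.ofList [c0, c1, c2] ∈ DNA_CODON_DICT.keys :=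
    (PySem.Dict.contains_iff_mem_keys _ _).mp h
  simp only [DNA_CODON_DICT, PySem.Dict.keys_mk, List.map_cons, List.map_nil, List.mem_cons,
    List.not_mem_nil, or_false] at hm
  rcases hm with hm | hm | hm | hm | hm | hm | hm | hm | hm | hm | hm | hm | hm | hm | hm | hm | hm | hm | hm | hm | hm | hm | hm | hm | hm | hm | hm | hm | hm | hm | hm | hm | hm | hm | hm | hm | hm | hm | hm | hm | hm | hm | hm | hm | hm | hm | hm | hm | hm | hm | hm | hm | hm | hm | hm | hm | hm | hm | hm | hm | hm | hm | hm | hm <;>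
  · have h2 := congrArg String.toList hm
    rw [String.toList_ofList] at h2
    injection h2 with e0 h2
    injection h2 with e1 h2
    injection h2 with e2 h2
    subst e0
    subst e1
    subst e2
    decide

-- A's break-fold step, abstracted over the looked-up value
def pvStep (st : String × Bool) (v : String) : String × Bool :=
  if st.2 then st else if v = "-" then (st.1, true) else (st.1 ++ v, st.2)

-- once the break flag is set, the fold is inert
theorem pvStep_stop (vs : List String) (acc : String) :
    vs.foldl pvStep (acc, true) = (acc, true) := by
  induction vs with
  | nil => rfl
  | cons v rest ih => simpa [pvStep] using ih

def pvP (c : String) : Bool :=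
  DNA_CODON_DICT.contains c && !(DNA_CODON_DICT.getD c "" == "-")

-- the codon list A slices out, as B sees it
theorem pv_cods_eq (dna : String) :
    (PySem.List.pyRange 0 (PySem.Str.len dna - 2) 3).map
        (fun i => PySem.Str.slice dna (some i) (some (i + 3)))
      = (pvChunk3 dna.toList).map (fun l => String.ofList l) := by
  rw [PySem.Str.len_eq, ← pv_slices_eq_chunks dna.toList, List.map_map]
  rfl

-- main induction: A's break-fold over the codons equals B's consuming loop, given that
-- the first codon failing pvP (if any) is still in the table
theorem pv_main (cs : List Char) : ∀ (acc : List String),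
    (((pvChunk3 cs).map (fun l => String.ofList l)).dropWhile pvP).head?.all
        (fun c => DNA_CODON_DICT.contains c) = true →
    (((pvChunk3 cs).map (fun l => DNA_CODON_DICT.getD (String.ofList l) "")).foldl
        pvStep (PySem.Str.join "" acc, false)).1
      = PySem.Str.join "" (pvTranslate cs acc) := by
  induction cs using pvChunk3.induct with
  | case1 c0 c1 c2 rest ih =>
    intro acc h
    simp only [pvChunk3, List.map_cons, List.foldl_cons, List.dropWhile_cons] at h ⊢
    by_cases hp : pvP (String.ofList [c0, c1, c2]) = true
    · rw [hp, if_pos rfl] at h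
      obtain ⟨hcon, hne⟩ : DNA_CODON_DICT.contains (String.ofList [c0, c1, c2]) = true
          ∧ DNA_CODON_DICT.getD (String.ofList [c0, c1, c2]) "" ≠ "-" := by
        have := hp
        unfold pvP at this
        rw [Bool.and_eq_true] at this
        refine ⟨this.1, ?_⟩
        have h2 := this.2
        simpa using h2
      rw [show pvStep (PySem.Str.join "" acc, false)
            (DNA_CODON_DICT.getD (String.ofList [c0, c1, c2]) "")
          = (PySem.Str.join "" acc ++ DNA_CODON_DICT.getD (String.ofList [c0, c1, c2]) "", false)
        from by simp [pvStep, hne]]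
      rw [show pvTranslate (c0 :: c1 :: c2 :: rest) acc
          = pvTranslate rest (acc ++ [pvAa c0 c1 c2]) from by
        rw [pvTranslate]
        simp only [pv_aa_eq c0 c1 c2 hcon, if_neg hne]]
      rw [← pv_join_snoc, pv_aa_eq c0 c1 c2 hcon]
      exact ih (acc ++ [DNA_CODON_DICT.getD (String.ofList [c0, c1, c2]) ""]) h
    · rw [Bool.not_eq_true] at hp
      rw [hp, if_neg (by decide)] at h
      simp only [List.head?_cons, Option.all_some] at h
      have hstop : DNA_CODON_DICT.getD (String.ofList [c0, c1, c2]) "" = "-" := by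
        unfold pvP at hp
        rw [Bool.and_eq_false_iff] at hp
        rcases hp with hp | hp
        · rw [hp] at h
          exact absurd h (by simp)
        · simpa using hp
      rw [show pvStep (PySem.Str.join "" acc, false)
            (DNA_CODON_DICT.getD (String.ofList [c0, c1, c2]) "")
          = (PySem.Str.join "" acc, true) from by simp [pvStep, hstop]]
      rw [pvStep_stop]
      rw [show pvTranslate (c0 :: c1 :: c2 :: rest) acc = acc from by
        rw [pvTranslate]
        simp only [pv_aa_eq c0 c1 c2 h, hstop, if_pos]]
  | case2 t ht =>
    intro acc _
    have hch : pvChunk3 t = [] := by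
      match t, ht with
      | [], _ => rfl
      | [c], _ => rfl
      | [c, c'], _ => rfl
      | c0 :: c1 :: c2 :: rest, ht => exact absurd (ht c0 c1 c2 rest rfl) not_false
    have htr : pvTranslate t acc = acc := by
      match t, ht with
      | [], _ => rfl
      | [c], _ => rfl
      | [c, c'], _ => rfl
      | c0 :: c1 :: c2 :: rest, ht => exact absurd (ht c0 c1 c2 rest rfl) not_false
    rw [hch, htr]
    rfl

-- both bodies, for the stripped string as a free variable
theorem pv_body (dna : String)
    (h : ((((pvChunk3 dna.toList).map (fun l => String.ofList l)).dropWhile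
          (fun c => DNA_CODON_DICT.contains c
            && !(DNA_CODON_DICT.getD c "" == "-"))).head?.all
        (fun c => DNA_CODON_DICT.contains c)) = true) :
    (((PySem.List.pyRange 0 (PySem.Str.len dna - 2) 3).foldl
        (fun (st : String × Bool) index =>
          if st.2 then st
          else if DNA_CODON_DICT.getD (PySem.Str.slice dna (some index) (some (index + 3))) "" = "-" then
            (st.1, true)
          else
            (st.1 ++ DNA_CODON_DICT.getD (PySem.Str.slice dna (some index) (some (index + 3))) "", st.2))
        ("", false))).1
      = PySem.Str.join "" (pvTranslate dna.toList []) := by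
  rw [show (PySem.List.pyRange 0 (PySem.Str.len dna - 2) 3).foldl
        (fun (st : String × Bool) index =>
          if st.2 then st
          else if DNA_CODON_DICT.getD (PySem.Str.slice dna (some index) (some (index + 3))) "" = "-" then
            (st.1, true)
          else
            (st.1 ++ DNA_CODON_DICT.getD (PySem.Str.slice dna (some index) (some (index + 3))) "", st.2))
        ("", false)
      = (((PySem.List.pyRange 0 (PySem.Str.len dna - 2) 3).map
            (fun i => PySem.Str.slice dna (some i) (some (i + 3)))).map
          (fun c => DNA_CODON_DICT.getD c "")).foldl pvStep ("", false) from by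
    rw [List.map_map, List.foldl_map]
    rfl]
  rw [pv_cods_eq, List.map_map]
  exact pv_main _ [] h

-- ===== VERDICT (by name: the statement is the Claim_ definition above) =====
theorem slicingRna_spec : Claim_equal_slicingRna := by
  intro orgDna introns _ hpre
  unfold Spec_slicingRna slicingRna slicingRna_alt
  simp only [Pre_slicingRna] at hpre
  rw [pv_cods_eq] at hpre
  exact pv_body _ hpre
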